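-- pv_equiv track=rewrite | github.com/seehasung/SHS_Product_DB | utils/comment_parser.py | group_comment_scripts
-- ===== SOURCE A (Python) =====
-- from typing import List, Dict, Optional
--
-- def group_comment_scripts(scripts: List[Dict]) -> Dict[int, List[Dict]]:
--     """
--     댓글 원고를 그룹별로 정리
--
--     Returns:
--         {
--             1: [script1, script2, script3],
--             2: [script4, script5],
--             ...
--         }
--     """
--     groups = {}
--
--     for script in scripts:
--         group_num = script['group']
--         if group_num not in groups:
--             groups[group_num] = []
--         groups[group_num].append(script)
--
--     # 각 그룹 내에서 순서대로 정렬
--     for group_num in groups: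
--         groups[group_num].sort(key=lambda x: x['sequence'])
--
--     return groups
-- ===== SOURCE B (Python) =====
-- def group_comment_scripts(scripts):
--     # One global stable sort by (group, sequence), then a single distribution
--     # pass into buckets created in first-appearance key order.
--     order = dict.fromkeys(s['group'] for s in scripts)
--     grouped = {g: [] for g in order}
--     for s in sorted(scripts, key=lambda x: (x['group'], x['sequence'])):
--         grouped[s['group']].append(s)
--     return grouped
-- ===== Notes on version B (the rewrite author's own statement) =====
-- stated objective: alternative
-- what changed: A buckets scripts by group and then sorts each bucket by sequence; B does one global stable sort of all scripts by the (group, sequence) pair and distributes the already-ordered scripts into buckets created in first-appearance key order.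
import Mathlib
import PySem

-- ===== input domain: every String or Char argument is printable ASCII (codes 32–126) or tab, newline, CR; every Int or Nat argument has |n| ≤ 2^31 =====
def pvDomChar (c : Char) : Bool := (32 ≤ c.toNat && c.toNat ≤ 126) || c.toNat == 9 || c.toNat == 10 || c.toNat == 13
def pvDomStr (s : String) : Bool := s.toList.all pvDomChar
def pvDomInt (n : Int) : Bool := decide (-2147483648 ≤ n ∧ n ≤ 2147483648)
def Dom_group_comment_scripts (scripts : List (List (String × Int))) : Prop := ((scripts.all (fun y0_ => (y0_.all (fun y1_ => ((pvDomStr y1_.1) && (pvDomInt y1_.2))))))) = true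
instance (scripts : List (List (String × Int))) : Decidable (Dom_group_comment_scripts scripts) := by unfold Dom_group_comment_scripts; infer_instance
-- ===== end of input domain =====

-- B replaces A's "bucket by group, then sort each bucket" with one global stable
-- sort by (group, sequence) followed by a single distribution pass (objective: alternative).

-- shared helper: script[k] for an int-valued field; exact wherever the key is present
-- (Pre_ guarantees that; Python raises KeyError otherwise, which Pre_ excludes)
def pvLookup (s : List (String × Int)) (k : String) : Int :=
  ((PySem.Dict.mk s).get? k).getD 0

def pvGroup (s : List (String × Int)) : Int := pvLookup s "group"
def pvSeq (s : List (String × Int)) : Int := pvLookup s "sequence"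

-- ===== PORT A =====
def group_comment_scripts (scripts : List (List (String × Int))) : List (Int × List (List (String × Int))) :=
  -- for script in scripts: if group not in groups: groups[group] = []; groups[group].append(script)
  let groups : PySem.Dict Int (List (List (String × Int))) :=
    scripts.foldl (fun d script =>
      let g := pvGroup script
      let d := if d.contains g then d else d.insert g []
      d.insert g (d.getD g [] ++ [script])) PySem.Dict.empty
  -- for group_num in groups: groups[group_num].sort(key=lambda x: x['sequence'])
  let groups :=
    groups.keys.foldl (fun d g =>
      d.insert g (PySem.List.sorted (d.getD g []) (fun x => pvSeq x))) groups
  groups.items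

-- ===== PORT B =====
def group_comment_scripts_alt (scripts : List (List (String × Int))) : List (Int × List (List (String × Int))) :=
  -- order = dict.fromkeys(s['group'] for s in scripts)
  let order := PySem.List.dedup (scripts.map (fun s => pvGroup s))
  -- grouped = {g: [] for g in order}
  let grouped : PySem.Dict Int (List (List (String × Int))) :=
    order.foldl (fun d g => d.insert g []) PySem.Dict.empty
  -- for s in sorted(scripts, key=lambda x: (x['group'], x['sequence'])): grouped[s['group']].append(s)
  let grouped :=
    (PySem.List.sorted2 scripts (fun s => pvGroup s) (fun s => pvSeq s)).foldl
      (fun d s => d.insert (pvGroup s) (d.getD (pvGroup s) [] ++ [s])) grouped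
  grouped.items

-- ===== PRECONDITION & SPEC =====
-- Pre_ excludes scripts missing the 'group' or 'sequence' key, on which Python A raises KeyError.
def Pre_group_comment_scripts (scripts : List (List (String × Int))) : Prop :=
  ∀ s ∈ scripts, (PySem.Dict.mk s).contains "group" = true ∧ (PySem.Dict.mk s).contains "sequence" = true
instance (scripts : List (List (String × Int))) : Decidable (Pre_group_comment_scripts scripts) := by
  unfold Pre_group_comment_scripts; infer_instance

def pvWitness_group_comment_scripts : (List (List (String × Int))) :=
  [[("group", 2), ("sequence", 1)], [("group", 1), ("sequence", 0)], [("group", 2), ("sequence", 0)]]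

def Spec_group_comment_scripts (scripts : List (List (String × Int))) (out : List (Int × List (List (String × Int)))) : Prop := out = group_comment_scripts_alt scripts
instance (scripts : List (List (String × Int))) (out : List (Int × List (List (String × Int)))) : Decidable (Spec_group_comment_scripts scripts out) := by unfold Spec_group_comment_scripts; infer_instance

-- ===== CLAIM (what is proved, stated in full; the proofs are below) =====
def Claim_equal_group_comment_scripts : Prop := ∀ (scripts : List (List (String × Int))), Dom_group_comment_scripts scripts → Pre_group_comment_scripts scripts → Spec_group_comment_scripts scripts (group_comment_scripts scripts)

-- ===== LEMMAS AND PROOFS =====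

-- the comparison sorted2 uses (lexicographic on (group, sequence))
def pvLt2 (a b : List (String × Int)) : Bool :=
  decide (pvGroup a < pvGroup b) || (!decide (pvGroup b < pvGroup a) && decide (pvSeq a < pvSeq b))

-- the comparison A's per-bucket sort uses
def pvLtS (a b : List (String × Int)) : Bool := decide (pvSeq a < pvSeq b)

theorem pvLt2_asym (a b : List (String × Int)) (h : pvLt2 a b = true) : pvLt2 b a = false := by
  simp [pvLt2] at h ⊢; omega

theorem pvLt2_trans_mixed (a b c : List (String × Int)) (h1 : pvLt2 a b = true)
    (h2 : pvLt2 c b = false) : pvLt2 a c = true := by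
  simp [pvLt2] at h1 h2 ⊢; omega

theorem pvLt2_eq_of_group_eq (x z : List (String × Int)) (h : pvGroup x = pvGroup z) :
    pvLt2 x z = pvLtS x z := by
  simp [pvLt2, pvLtS, h]

-- insertBy puts x in front when it goes before everything
theorem pv_insertBy_front {α : Type} (bef : α → α → Bool) (x : α) (l : List α)
    (h : ∀ z ∈ l, bef x z = true) : PySem.List.insertBy bef x l = x :: l := by
  cases l with
  | nil => simp [PySem.List.insertBy]
  | cons y ys => simp [PySem.List.insertBy, h y (List.mem_cons_self)]

-- filtering past an inserted element the filter drops
theorem pv_filter_insertBy_neg {α : Type} (bef : α → α → Bool) (p : α → Bool) (x : α)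
    (l : List α) (hx : p x = false) :
    (PySem.List.insertBy bef x l).filter p = l.filter p := by
  induction l with
  | nil => simp [PySem.List.insertBy, hx]
  | cons y ys ih =>
    by_cases h : bef x y = true
    · simp [PySem.List.insertBy, h, List.filter_cons, hx]
    · simp only [PySem.List.insertBy, h, if_false, Bool.false_eq_true, List.filter_cons]
      rw [ih]

-- filtering commutes with inserting a kept element into a bef-sorted list
theorem pv_filter_insertBy_pos {α : Type} (bef : α → α → Bool) (p : α → Bool) (x : α)
    (l : List α) (hx : p x = true)
    (htr : ∀ a b c, bef a b = true → bef c b = false → bef a c = true)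
    (hp : l.Pairwise (fun a b => bef b a = false)) :
    (PySem.List.insertBy bef x l).filter p = PySem.List.insertBy bef x (l.filter p) := by
  induction l with
  | nil => simp [PySem.List.insertBy, hx]
  | cons y ys ih =>
    rcases List.pairwise_cons.mp hp with ⟨hy, hys⟩
    by_cases h : bef x y = true
    · by_cases hpy : p y = true
      · rw [show PySem.List.insertBy bef x (y :: ys) = x :: y :: ys by simp [PySem.List.insertBy, h]]
        simp only [List.filter_cons, hx, hpy, if_true]
        rw [pv_insertBy_front bef x (y :: (ys.filter p))]
        intro z hz
        rcases List.mem_cons.mp hz with rfl | hz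
        · exact h
        · exact htr x y z h (hy z (List.mem_of_mem_filter hz))
      · rw [show PySem.List.insertBy bef x (y :: ys) = x :: y :: ys by simp [PySem.List.insertBy, h]]
        simp only [List.filter_cons, hx, hpy, if_true, Bool.false_eq_true, if_false]
        rw [pv_insertBy_front bef x (ys.filter p)]
        intro z hz
        exact htr x y z h (hy z (List.mem_of_mem_filter hz))
    · rw [show PySem.List.insertBy bef x (y :: ys) = y :: PySem.List.insertBy bef x ys by
          simp [PySem.List.insertBy, h]]
      by_cases hpy : p y = true
      · simp only [List.filter_cons, hpy, if_true]
        rw [show PySem.List.insertBy bef x (y :: ys.filter p) = y :: PySem.List.insertBy bef x (ys.filter p) by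
          simp [PySem.List.insertBy, h]]
        rw [ih hys]
      · simp only [List.filter_cons, hpy, Bool.false_eq_true, if_false]
        exact ih hys

theorem pv_pairwise_insertBy {α : Type} (bef : α → α → Bool) (x : α) (l : List α)
    (hasym : ∀ a b, bef a b = true → bef b a = false)
    (htr : ∀ a b c, bef a b = true → bef c b = false → bef a c = true)
    (hp : l.Pairwise (fun a b => bef b a = false)) :
    (PySem.List.insertBy bef x l).Pairwise (fun a b => bef b a = false) := by
  induction l with
  | nil => simp [PySem.List.insertBy]
  | cons y ys ih =>
    rcases List.pairwise_cons.mp hp with ⟨hy, hys⟩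
    by_cases h : bef x y = true
    · rw [show PySem.List.insertBy bef x (y :: ys) = x :: y :: ys by simp [PySem.List.insertBy, h]]
      refine List.pairwise_cons.mpr ⟨?_, hp⟩
      intro z hz
      rcases List.mem_cons.mp hz with rfl | hz
      · exact hasym x z h
      · by_contra hc
        have : bef z y = true := htr z x y (Bool.of_not_eq_false hc) (hasym x y h)
        rw [hy z hz] at this
        exact Bool.false_ne_true this
    · rw [show PySem.List.insertBy bef x (y :: ys) = y :: PySem.List.insertBy bef x ys by
        simp [PySem.List.insertBy, h]]
      refine List.pairwise_cons.mpr ⟨?_, ih hys⟩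
      intro z hz
      rcases (PySem.List.mem_insertBy bef x z ys).mp hz with rfl | hz
      · exact Bool.of_not_eq_true h
      · exact hy z hz

-- filtering a stable insertion sort = insertion-sorting the filtered list
theorem pv_filter_foldl {α : Type} (bef : α → α → Bool) (p : α → Bool)
    (hasym : ∀ a b, bef a b = true → bef b a = false)
    (htr : ∀ a b c, bef a b = true → bef c b = false → bef a c = true)
    (xs : List α) : ∀ acc : List α, acc.Pairwise (fun a b => bef b a = false) →
    (xs.foldl (fun a x => PySem.List.insertBy bef x a) acc).filter p
      = (xs.filter p).foldl (fun a x => PySem.List.insertBy bef x a) (acc.filter p) := by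
  induction xs with
  | nil => intro acc _; simp
  | cons x t ih =>
    intro acc hacc
    simp only [List.foldl_cons, List.filter_cons]
    by_cases hx : p x = true
    · rw [ih _ (pv_pairwise_insertBy bef x acc hasym htr hacc),
        pv_filter_insertBy_pos bef p x acc hx htr hacc]
      simp [hx]
    · rw [ih _ (pv_pairwise_insertBy bef x acc hasym htr hacc),
        pv_filter_insertBy_neg bef p x acc (Bool.of_not_eq_true hx)]
      simp [hx]

theorem pv_insertBy_congr {α : Type} (bef1 bef2 : α → α → Bool) (x : α) (l : List α)
    (h : ∀ z ∈ l, bef1 x z = bef2 x z) :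
    PySem.List.insertBy bef1 x l = PySem.List.insertBy bef2 x l := by
  induction l with
  | nil => rfl
  | cons y ys ih =>
    have hy := h y List.mem_cons_self
    by_cases hb : bef1 x y = true
    · simp [PySem.List.insertBy, hb, hy ▸ hb]
    · have hb2 : ¬ bef2 x y = true := by rw [← hy]; exact hb
      simp only [PySem.List.insertBy, hb, hb2, if_false, Bool.false_eq_true]
      rw [ih (fun z hz => h z (List.mem_cons_of_mem y hz))]

-- within one group the lexicographic comparison is the sequence comparison
theorem pv_foldl_lt2_eq_ltS (g : Int) (l : List (List (String × Int))) :
    ∀ acc : List (List (String × Int)), (∀ z ∈ acc, pvGroup z = g) → (∀ z ∈ l, pvGroup z = g) →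
    l.foldl (fun a x => PySem.List.insertBy pvLt2 x a) acc
      = l.foldl (fun a x => PySem.List.insertBy pvLtS x a) acc := by
  induction l with
  | nil => intro acc _ _; rfl
  | cons x t ih =>
    intro acc hacc hl
    have hx : pvGroup x = g := hl x List.mem_cons_self
    simp only [List.foldl_cons]
    rw [pv_insertBy_congr pvLt2 pvLtS x acc
      (fun z hz => pvLt2_eq_of_group_eq x z (by rw [hx, hacc z hz]))]
    exact ih _ (fun z hz => by
        rcases (PySem.List.mem_insertBy pvLtS x z acc).mp hz with rfl | hz
        · exact hx
        · exact hacc z hz)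
      (fun z hz => hl z (List.mem_cons_of_mem x hz))

-- KEY LEMMA: the global stable sort restricted to one group = that bucket sorted by sequence
theorem pv_sorted2_filter (xs : List (List (String × Int))) (g : Int) :
    (PySem.List.sorted2 xs (fun s => pvGroup s) (fun s => pvSeq s)).filter (fun s => pvGroup s == g)
      = PySem.List.sorted (xs.filter (fun s => pvGroup s == g)) (fun x => pvSeq x) := by
  have h2 : PySem.List.sorted2 xs (fun s => pvGroup s) (fun s => pvSeq s)
      = xs.foldl (fun a x => PySem.List.insertBy pvLt2 x a) [] := rfl
  have h1 : PySem.List.sorted (xs.filter (fun s => pvGroup s == g)) (fun x => pvSeq x)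
      = (xs.filter (fun s => pvGroup s == g)).foldl (fun a x => PySem.List.insertBy pvLtS x a) [] := rfl
  rw [h2, h1,
    pv_filter_foldl pvLt2 (fun s => pvGroup s == g) pvLt2_asym pvLt2_trans_mixed xs [] List.Pairwise.nil]
  simp only [List.filter_nil]
  exact pv_foldl_lt2_eq_ltS g _ [] (by simp)
    (fun z hz => by simpa using (List.mem_filter.mp hz).2)

-- A's grouping step is a modify
theorem pv_stepA_eq (d : PySem.Dict Int (List (List (String × Int)))) (s : List (String × Int)) :
    (if d.contains (pvGroup s) then d else d.insert (pvGroup s) []).insert (pvGroup s)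
      ((if d.contains (pvGroup s) then d else d.insert (pvGroup s) []).getD (pvGroup s) [] ++ [s])
      = d.modify (pvGroup s) [] (· ++ [s]) := by
  by_cases h : d.contains (pvGroup s) = true
  · simp [h, PySem.Dict.modify]
  · have h' : d.contains (pvGroup s) = false := Bool.of_not_eq_true h
    simp only [h', Bool.false_eq_true, if_false, PySem.Dict.modify]
    rw [PySem.Dict.getD_insert_self, PySem.Dict.insert_insert_self,
      PySem.Dict.getD_of_not_contains d _ h']

-- Set.update by elements already present is the identity
theorem pv_set_update_of_subset {α : Type} [BEq α] [LawfulBEq α] (l : List α) :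
    ∀ s : PySem.Set α, (∀ x ∈ l, x ∈ s) → PySem.Set.update s l = s := by
  induction l with
  | nil => intro s _; rfl
  | cons x t ih =>
    intro s hs
    show PySem.Set.update (PySem.Set.add s x) t = s
    have : PySem.Set.add s x = s := by
      simp [PySem.Set.add, PySem.Set.contains, hs x List.mem_cons_self]
    rw [this]
    exact ih s (fun z hz => hs z (List.mem_cons_of_mem x hz))

-- a fold that re-inserts a function of each key's current value, keys distinct
theorem pv_getD_fold_once (F : List (List (String × Int)) → List (List (String × Int)))
    (ks : List Int) (hnd : ks.Nodup) :
    ∀ (d : PySem.Dict Int (List (List (String × Int)))) (g : Int),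
    (ks.foldl (fun d k => d.insert k (F (d.getD k []))) d).getD g []
      = if g ∈ ks then F (d.getD g []) else d.getD g [] := by
  induction ks with
  | nil => intro d g; simp
  | cons k t ih =>
    intro d g
    rcases List.nodup_cons.mp hnd with ⟨hk, hnt⟩
    simp only [List.foldl_cons]
    rw [ih hnt]
    by_cases hg : g ∈ t
    · have hne : g ≠ k := fun h => hk (h ▸ hg)
      simp [hg, List.mem_cons, PySem.Dict.getD_insert_of_ne _ _ _ hne]
    · by_cases hgk : g = k
      · subst hgk
        simp [hg, PySem.Dict.getD_insert_self]
      · simp [hg, hgk, PySem.Dict.getD_insert_of_ne _ _ _ hgk]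

-- a fold inserting [] at every key leaves every getD _ [] at []
theorem pv_getD_fold_empty (ks : List Int) :
    ∀ (d : PySem.Dict Int (List (List (String × Int)))) (g : Int), d.getD g [] = [] →
    (ks.foldl (fun d k => d.insert k []) d).getD g [] = [] := by
  induction ks with
  | nil => intro d g h; exact h
  | cons k t ih =>
    intro d g h
    simp only [List.foldl_cons]
    refine ih _ g ?_
    by_cases hgk : g = k
    · subst hgk; rw [PySem.Dict.getD_insert_self]
    · rw [PySem.Dict.getD_insert_of_ne _ _ _ hgk]; exact h

-- Set.ofList of a duplicate-free list is that list
theorem pv_ofList_aux {α : Type} [BEq α] [LawfulBEq α] (l : List α) :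
    ∀ s : PySem.Set α, (∀ x ∈ l, x ∉ s) → l.Nodup → l.foldl PySem.Set.add s = s ++ l := by
  induction l with
  | nil => intro s _ _; simp
  | cons x t ih =>
    intro s hs hnd
    rcases List.nodup_cons.mp hnd with ⟨hx, hnt⟩
    have hadd : PySem.Set.add s x = s ++ [x] := by
      simp [PySem.Set.add, PySem.Set.contains, hs x List.mem_cons_self]
    show t.foldl PySem.Set.add (PySem.Set.add s x) = s ++ x :: t
    rw [hadd, ih (s ++ [x]) (fun z hz => by
        simp only [List.mem_append, List.mem_singleton]
        rintro (h | rfl)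
        · exact hs z (List.mem_cons_of_mem x hz) h
        · exact hx hz) hnt]
    simp

theorem pv_ofList_nodup {α : Type} [BEq α] [LawfulBEq α] (l : List α) (h : l.Nodup) :
    PySem.Set.ofList l = l := by
  show l.foldl PySem.Set.add PySem.Set.empty = l
  rw [pv_ofList_aux l PySem.Set.empty (by intro x _ hx; simp [PySem.Set.empty] at hx) h]
  rfl

-- characterisation of the grouping fold shared by both ports
theorem pv_groupfold_getD (xs : List (List (String × Int)))
    (d : PySem.Dict Int (List (List (String × Int)))) (g : Int) :
    (xs.foldl (fun d s => d.modify (pvGroup s) [] (· ++ [s])) d).getD g []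
      = d.getD g [] ++ xs.filter (fun s => pvGroup s == g) := by
  rw [show xs.foldl (fun d s => d.modify (pvGroup s) [] (· ++ [s])) d
      = (xs.map (fun s => (pvGroup s, s))).foldl (fun d p => d.modify p.1 [] (· ++ [p.2])) d by
    rw [List.foldl_map]]
  rw [PySem.Dict.getD_foldl_modify_append]
  congr 1
  rw [List.filter_map]
  simp [List.map_map, Function.comp_def]

-- characterisation of A's port
theorem pv_A_char (xs : List (List (String × Int))) :
    group_comment_scripts xs
      = (PySem.Set.ofList (xs.map (fun s => pvGroup s))).map
          (fun g => (g, PySem.List.sorted (xs.filter (fun s => pvGroup s == g)) (fun x => pvSeq x))) := by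
  simp only [group_comment_scripts, pv_stepA_eq]
  set G := xs.foldl (fun d s => d.modify (pvGroup s) [] (· ++ [s])) PySem.Dict.empty with hGdef
  have hGget : ∀ g : Int, G.getD g [] = xs.filter (fun s => pvGroup s == g) := by
    intro g
    rw [hGdef, pv_groupfold_getD, PySem.Dict.getD_empty]
    rfl
  have hGkeys : G.keys = PySem.Set.ofList (xs.map (fun s => pvGroup s)) := by
    rw [hGdef, PySem.Dict.keys_foldl_modify_key xs (fun s => pvGroup s) [] (fun _ s => (· ++ [s]))]
    rw [PySem.Dict.keys_empty]
    rfl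
  have hGnodup : G.keys.Nodup := by
    rw [hGdef]
    exact PySem.Dict.nodup_keys_foldl_modify_key xs (fun s => pvGroup s) [] (fun _ s => (· ++ [s]))
      PySem.Dict.empty (by simp)
  have hk2 : (G.keys.foldl (fun d g =>
        d.insert g (PySem.List.sorted (d.getD g []) (fun x => pvSeq x))) G).keys = G.keys := by
    rw [PySem.Dict.keys_foldl_insert]
    exact pv_set_update_of_subset G.keys G.keys (fun x hx => hx)
  have hn2 : (G.keys.foldl (fun d g =>
        d.insert g (PySem.List.sorted (d.getD g []) (fun x => pvSeq x))) G).keys.Nodup := by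
    rw [hk2]; exact hGnodup
  rw [PySem.Dict.items_eq_map_keys _ hn2 [], hk2, hGkeys]
  refine List.map_congr_left ?_
  intro g hg
  have hgk : g ∈ G.keys := by rw [hGkeys]; exact hg
  rw [← hGkeys]
  have := pv_getD_fold_once (fun v => PySem.List.sorted v (fun x => pvSeq x)) G.keys hGnodup G g
  rw [if_pos hgk] at this
  rw [this, hGget g]

-- characterisation of B's port
theorem pv_B_char (xs : List (List (String × Int))) :
    group_comment_scripts_alt xs
      = (PySem.Set.ofList (xs.map (fun s => pvGroup s))).map
          (fun g => (g, (PySem.List.sorted2 xs (fun s => pvGroup s) (fun s => pvSeq s)).filter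
              (fun s => pvGroup s == g))) := by
  simp only [group_comment_scripts_alt]
  set order := PySem.List.dedup (xs.map (fun s => pvGroup s)) with horder
  set ranked := PySem.List.sorted2 xs (fun s => pvGroup s) (fun s => pvSeq s) with hranked
  set d0 := order.foldl (fun d g => d.insert g []) (PySem.Dict.empty (κ := Int) (ν := List (List (String × Int)))) with hd0
  have horder' : order = PySem.Set.ofList (xs.map (fun s => pvGroup s)) := rfl
  have hmemorder : ∀ z ∈ ranked.map (fun s => pvGroup s), z ∈ order := by
    intro z hz
    rcases List.mem_map.mp hz with ⟨s, hs, rfl⟩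
    have hsx : s ∈ xs := (PySem.List.sorted2_perm xs (fun s => pvGroup s) (fun s => pvSeq s) false).mem_iff.mp hs
    rw [horder']
    exact (PySem.Set.mem_ofList _ _).mpr (List.mem_map_of_mem hsx)
  have hd0keys : d0.keys = order := by
    rw [hd0, PySem.Dict.keys_foldl_insert, PySem.Dict.keys_empty]
    show PySem.Set.ofList order = order
    exact pv_ofList_nodup order (horder' ▸ PySem.Set.nodup_ofList _)
  have hd0nodup : d0.keys.Nodup := by
    rw [hd0]
    exact PySem.Dict.nodup_keys_foldl_insert _ _ _ (by simp)
  have hd0get : ∀ g : Int, d0.getD g [] = [] := by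
    intro g
    rw [hd0]
    exact pv_getD_fold_empty order PySem.Dict.empty g (PySem.Dict.getD_empty _ _)
  have hstep : (fun (d : PySem.Dict Int (List (List (String × Int)))) s =>
      d.insert (pvGroup s) (d.getD (pvGroup s) [] ++ [s]))
      = fun d s => d.modify (pvGroup s) [] (· ++ [s]) := rfl
  rw [hstep]
  have hkeys : (ranked.foldl (fun d s => d.modify (pvGroup s) [] (· ++ [s])) d0).keys = order := by
    rw [PySem.Dict.keys_foldl_modify_key ranked (fun s => pvGroup s) [] (fun _ s => (· ++ [s])), hd0keys]
    exact pv_set_update_of_subset _ _ hmemorder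
  have hnodup : (ranked.foldl (fun d s => d.modify (pvGroup s) [] (· ++ [s])) d0).keys.Nodup := by
    rw [hkeys]
    rw [hd0keys] at hd0nodup
    exact hd0nodup
  rw [PySem.Dict.items_eq_map_keys _ hnodup [], hkeys, horder']
  refine List.map_congr_left ?_
  intro g _
  rw [pv_groupfold_getD, hd0get g]
  rfl

-- ===== VERDICT (by name: the statement is the Claim_ definition above) =====
theorem group_comment_scripts_spec : Claim_equal_group_comment_scripts := by
  intro scripts _ _
  unfold Spec_group_comment_scripts
  rw [pv_A_char, pv_B_char]
  refine List.map_congr_left ?_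
  intro g _
  rw [pv_sorted2_filter]
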